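-- pv_equiv track=rewrite | github.com/bennygiardina/test_2 | update_indian_wells_matches_csv.py | smart_title_token
-- ===== SOURCE A (Python) =====
-- def smart_title_token(token: str) -> str:
--     token = token.strip()
--     if not token:
--         return token
--
--     if "-" in token:
--         return "-".join(smart_title_token(part) for part in token.split("-"))
--
--     if "'" in token:
--         return "'".join(smart_title_token(part) for part in token.split("'"))
--
--     return token[:1].upper() + token[1:].lower()
-- ===== SOURCE B (Python) =====
-- def smart_title_token(token: str) -> str:
--     token = token.strip()
--     if not token:
--         return token
--     out = []
--     frag = []
--     for ch in token:
--         if ch == "-" or ch == "'":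
--             f = "".join(frag).strip()
--             out.append(f[:1].upper() + f[1:].lower())
--             out.append(ch)
--             frag = []
--         else:
--             frag.append(ch)
--     f = "".join(frag).strip()
--     out.append(f[:1].upper() + f[1:].lower())
--     return "".join(out)
-- ===== Notes on version B (the rewrite author's own statement) =====
-- stated objective: alternative
-- what changed: Replaces A's recursive split-then-rejoin on hyphen and apostrophe delimiters with a single flat left-to-right scan that accumulates a fragment and, at each delimiter, flushes the stripped capitalized fragment plus the delimiter into the output.
import Mathlib
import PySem

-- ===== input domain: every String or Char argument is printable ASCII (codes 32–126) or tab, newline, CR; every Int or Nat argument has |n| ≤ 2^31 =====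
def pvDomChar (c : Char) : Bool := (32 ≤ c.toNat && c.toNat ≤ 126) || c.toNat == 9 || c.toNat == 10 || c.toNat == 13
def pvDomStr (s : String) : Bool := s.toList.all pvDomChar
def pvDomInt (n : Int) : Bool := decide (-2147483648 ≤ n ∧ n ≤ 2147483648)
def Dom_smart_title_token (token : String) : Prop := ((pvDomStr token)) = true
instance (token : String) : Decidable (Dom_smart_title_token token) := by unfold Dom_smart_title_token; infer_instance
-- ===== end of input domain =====

-- B replaces A's recursive split/rejoin on '-' and '\'' by one flat left-to-right scan that
-- flushes a capitalized stripped fragment at every delimiter (objective: alternative decomposition).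

-- ===== PORT A =====
-- Helpers needed by port A's termination proof (split parts are strictly shorter when the
-- separator occurs); pvSplitChar is a simple recursive model of Python's split on a 1-char sep.
def pvSplitChar (d : Char) : List Char → List (List Char)
  | [] => [[]]
  | c :: rest =>
    if c = d then [] :: pvSplitChar d rest
    else
      match pvSplitChar d rest with
      | [] => [[c]]
      | p :: ps => (c :: p) :: ps

theorem pvSplitChar_ne_nil (d : Char) (t : List Char) : pvSplitChar d t ≠ [] := by
  induction t with
  | nil => simp [pvSplitChar]
  | cons c rest ih =>
    simp only [pvSplitChar]
    split
    · simp
    · cases h : pvSplitChar d rest <;> simp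

theorem pvSplitOn_go_eq (d : Char) (fuel : Nat) (l cur : List Char) (acc : List (List Char))
    (h : l.length < fuel) :
    PySem.Chars.splitOn.go [d] fuel l cur acc =
      acc.reverse ++ (match pvSplitChar d l with
        | [] => []
        | p :: ps => (cur.reverse ++ p) :: ps) := by
  induction l generalizing fuel cur acc with
  | nil =>
    cases fuel with
    | zero => omega
    | succ n => simp [PySem.Chars.splitOn.go, pvSplitChar]
  | cons c rest ih =>
    cases fuel with
    | zero => omega
    | succ n =>
      simp only [PySem.Chars.splitOn.go]
      by_cases hc : c = d
      · subst hc
        have hpre : [c].isPrefixOf (c :: rest) = true := by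
          simp [List.isPrefixOf]
        rw [if_pos hpre]
        simp only [List.length_cons, List.length_nil, List.drop_succ_cons, List.drop_zero]
        rw [ih n [] ((cur.reverse) :: acc) (by simpa using Nat.lt_of_succ_lt_succ h)]
        simp only [pvSplitChar, if_true]
        cases hsp : pvSplitChar c rest with
        | nil => exact absurd hsp (pvSplitChar_ne_nil c rest)
        | cons p ps => simp
      · have hpre : [d].isPrefixOf (c :: rest) = false := by
          simp [List.isPrefixOf]
          exact fun hdc => absurd hdc.symm hc
        rw [if_neg (by simp [hpre])]
        rw [ih n (c :: cur) acc (by simpa using Nat.lt_of_succ_lt_succ h)]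
        simp only [pvSplitChar, if_neg hc]
        cases hsp : pvSplitChar d rest with
        | nil => exact absurd hsp (pvSplitChar_ne_nil d rest)
        | cons p ps => simp

theorem pvSplitOn_eq (d : Char) (t : List Char) :
    PySem.Chars.splitOn t [d] = pvSplitChar d t := by
  unfold PySem.Chars.splitOn
  rw [pvSplitOn_go_eq d (t.length + 1) t [] [] (by omega)]
  cases hsp : pvSplitChar d t with
  | nil => exact absurd hsp (pvSplitChar_ne_nil d t)
  | cons p ps => simp

theorem pvSplitChar_length_le (d : Char) (t : List Char) (p : List Char)
    (hp : p ∈ pvSplitChar d t) : p.length ≤ t.length := by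
  induction t generalizing p with
  | nil => simp [pvSplitChar] at hp; simp [hp]
  | cons c rest ih =>
    simp only [pvSplitChar] at hp
    by_cases hc : c = d
    · rw [if_pos hc] at hp
      rcases List.mem_cons.mp hp with h | h
      · simp [h]
      · exact Nat.le_succ_of_le (ih p h)
    · rw [if_neg hc] at hp
      cases hsp : pvSplitChar d rest with
      | nil => exact absurd hsp (pvSplitChar_ne_nil d rest)
      | cons q qs =>
        rw [hsp] at hp
        rcases List.mem_cons.mp hp with h | h
        · subst h
          simpa using ih q (by rw [hsp]; exact List.mem_cons_self ..)
        · exact Nat.le_succ_of_le (ih p (by rw [hsp]; exact List.mem_cons_of_mem _ h))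

theorem pvSplitChar_length_lt (d : Char) (t : List Char) (hd : d ∈ t) (p : List Char)
    (hp : p ∈ pvSplitChar d t) : p.length < t.length := by
  induction t generalizing p with
  | nil => simp at hd
  | cons c rest ih =>
    simp only [pvSplitChar] at hp
    by_cases hc : c = d
    · rw [if_pos hc] at hp
      rcases List.mem_cons.mp hp with h | h
      · simp [h]
      · exact Nat.lt_succ_of_le (pvSplitChar_length_le d rest p h)
    · have hd' : d ∈ rest := by
        rcases List.mem_cons.mp hd with h | h
        · exact absurd h.symm hc
        · exact h
      rw [if_neg hc] at hp
      cases hsp : pvSplitChar d rest with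
      | nil => exact absurd hsp (pvSplitChar_ne_nil d rest)
      | cons q qs =>
        rw [hsp] at hp
        rcases List.mem_cons.mp hp with h | h
        · subst h
          simpa using ih hd' q (by rw [hsp]; exact List.mem_cons_self ..)
        · exact Nat.lt_succ_of_lt (ih hd' p (by rw [hsp]; exact List.mem_cons_of_mem _ h))

theorem pv_strip_length_le (cs : List Char) : (PySem.Chars.strip cs).length ≤ cs.length := by
  unfold PySem.Chars.strip PySem.Chars.rstrip PySem.Chars.lstrip
  have h1 := List.length_dropWhile_le PySem.Chars.isspace
    (List.dropWhile PySem.Chars.isspace cs).reverse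
  have h2 := List.length_dropWhile_le PySem.Chars.isspace cs
  simp only [List.length_reverse] at h1 ⊢
  omega

theorem pv_isIn_singleton (d : Char) (t : List Char) :
    PySem.Chars.isIn [d] t = true ↔ d ∈ t := by
  rw [PySem.Chars.isIn_iff_infix]
  exact List.singleton_infix_iff d t

theorem pv_splitOn_mem_lt (d : Char) (cs : List Char) (p : List Char)
    (hd : PySem.Chars.isIn [d] (PySem.Chars.strip cs) = true)
    (hp : p ∈ PySem.Chars.splitOn (PySem.Chars.strip cs) [d]) :
    p.length < cs.length := by
  rw [pvSplitOn_eq] at hp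
  exact Nat.lt_of_lt_of_le
    (pvSplitChar_length_lt d _ ((pv_isIn_singleton d _).mp hd) p hp)
    (pv_strip_length_le cs)

-- literal transliteration of A (strip; empty → itself; recurse over split('-'), then split("'");
-- else token[:1].upper() + token[1:].lower())
def pvStA (cs : List Char) : List Char :=
  let t := PySem.Chars.strip cs
  if t = [] then t
  else if _h1 : PySem.Chars.isIn ['-'] t = true then
    PySem.Chars.join ['-']
      ((PySem.Chars.splitOn t ['-']).attach.map (fun p => pvStA p.1))
  else if _h2 : PySem.Chars.isIn ['\''] t = true then
    PySem.Chars.join ['\'']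
      ((PySem.Chars.splitOn t ['\'']).attach.map (fun p => pvStA p.1))
  else
    PySem.Chars.upper (PySem.Chars.slice t none (some 1)) ++
      PySem.Chars.lower (PySem.Chars.slice t (some 1) none)
termination_by cs.length
decreasing_by
  · exact pv_splitOn_mem_lt '-' cs p.1 _h1 p.2
  · exact pv_splitOn_mem_lt '\'' cs p.1 _h2 p.2

def smart_title_token (token : String) : String :=
  String.ofList (pvStA token.toList)

-- ===== PORT B =====
-- literal transliteration of Source B's single scan: frag accumulates non-delimiter chars; at each
-- '-'/'\'' flush the capitalized stripped fragment and the delimiter into out; join at the end.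
def pvCapB (frag : List Char) : List Char :=
  let f := PySem.Chars.strip frag
  PySem.Chars.upper (PySem.Chars.slice f none (some 1)) ++
    PySem.Chars.lower (PySem.Chars.slice f (some 1) none)

def pvStBGo (out : List (List Char)) (frag : List Char) : List Char → List (List Char)
  | [] => out ++ [pvCapB frag]
  | c :: rest =>
    if c = '-' ∨ c = '\'' then pvStBGo (out ++ [pvCapB frag, [c]]) [] rest
    else pvStBGo out (frag ++ [c]) rest

def smart_title_token_alt (token : String) : String :=
  let t := PySem.Chars.strip token.toList
  if t = [] then String.ofList t
  else String.ofList (PySem.Chars.join [] (pvStBGo [] [] t))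

-- ===== PRECONDITION & SPEC =====
def Spec_smart_title_token (token : String) (out : String) : Prop := out = smart_title_token_alt token
instance (token : String) (out : String) : Decidable (Spec_smart_title_token token out) := by unfold Spec_smart_title_token; infer_instance

-- ===== CLAIM (what is proved, stated in full; the proofs are below) =====
def Claim_equal_smart_title_token : Prop := ∀ (token : String), Dom_smart_title_token token → Spec_smart_title_token token (smart_title_token token)

-- ===== LEMMAS AND PROOFS =====

-- pvS t = the final joined string of B's scan started on t
def pvS (t : List Char) : List Char := PySem.Chars.join [] (pvStBGo [] [] t)

theorem pv_join_nil_eq_flatten (ps : List (List Char)) :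
    PySem.Chars.join [] ps = ps.flatten := by
  induction ps with
  | nil => simp [PySem.Chars.join_nil]
  | cons p rest ih =>
    cases rest with
    | nil => simp [PySem.Chars.join_singleton]
    | cons q rs => rw [PySem.Chars.join_cons_cons]; simp [ih]

theorem pvStBGo_out_shift (o1 o2 : List (List Char)) (frag t : List Char) :
    pvStBGo (o1 ++ o2) frag t = o1 ++ pvStBGo o2 frag t := by
  induction t generalizing o2 frag with
  | nil => simp [pvStBGo]
  | cons c rest ih =>
    simp only [pvStBGo]
    split_ifs with hc
    · rw [List.append_assoc, ih]
    · rw [ih]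

theorem pvStBGo_delim (d : Char) (hd : d = '-' ∨ d = '\'') (u v : List Char)
    (out : List (List Char)) (frag : List Char) :
    pvStBGo out frag (u ++ d :: v) =
      pvStBGo out frag u ++ [[d]] ++ pvStBGo [] [] v := by
  induction u generalizing out frag with
  | nil =>
    simp only [List.nil_append, pvStBGo, if_pos hd]
    rw [show out ++ [pvCapB frag, [d]] = (out ++ [pvCapB frag] ++ [[d]]) ++ [] by simp]
    rw [pvStBGo_out_shift]
  | cons c u' ih =>
    simp only [List.cons_append, pvStBGo]
    split_ifs with hc
    · rw [ih]
    · rw [ih]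

theorem pvStBGo_nodelim (u : List Char) (h : ∀ c ∈ u, ¬(c = '-' ∨ c = '\''))
    (out : List (List Char)) (frag : List Char) :
    pvStBGo out frag u = out ++ [pvCapB (frag ++ u)] := by
  induction u generalizing frag with
  | nil => simp [pvStBGo]
  | cons c u' ih =>
    simp only [pvStBGo]
    rw [if_neg (h c (List.mem_cons_self ..))]
    rw [ih (fun c hc => h c (List.mem_cons_of_mem _ hc)) (frag ++ [c])]
    simp

theorem pv_dropWhile_ws (ws l : List Char) (h : ∀ c ∈ ws, PySem.Chars.isspace c = true) :
    List.dropWhile PySem.Chars.isspace (ws ++ l) = List.dropWhile PySem.Chars.isspace l := by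
  induction ws with
  | nil => simp
  | cons c ws' ih =>
    simp only [List.cons_append, List.dropWhile_cons, h c (List.mem_cons_self ..), if_pos]
    exact ih (fun c hc => h c (List.mem_cons_of_mem _ hc))

theorem pv_lstrip_ws_append (ws f : List Char) (h : ∀ c ∈ ws, PySem.Chars.isspace c = true) :
    PySem.Chars.lstrip (ws ++ f) = PySem.Chars.lstrip f := by
  unfold PySem.Chars.lstrip
  exact pv_dropWhile_ws ws f h

theorem pv_rstrip_append_ws (f ws : List Char) (h : ∀ c ∈ ws, PySem.Chars.isspace c = true) :
    PySem.Chars.rstrip (f ++ ws) = PySem.Chars.rstrip f := by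
  unfold PySem.Chars.rstrip
  rw [List.reverse_append]
  rw [pv_dropWhile_ws ws.reverse f.reverse (fun c hc => h c (List.mem_reverse.mp hc))]

theorem pv_strip_ws_append (ws f : List Char) (h : ∀ c ∈ ws, PySem.Chars.isspace c = true) :
    PySem.Chars.strip (ws ++ f) = PySem.Chars.strip f := by
  unfold PySem.Chars.strip
  rw [pv_lstrip_ws_append ws f h]

theorem pv_strip_append_ws (f ws : List Char) (h : ∀ c ∈ ws, PySem.Chars.isspace c = true) :
    PySem.Chars.strip (f ++ ws) = PySem.Chars.strip f := by
  unfold PySem.Chars.strip PySem.Chars.lstrip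
  rw [List.dropWhile_append]
  split_ifs with he
  · have hws : List.dropWhile PySem.Chars.isspace ws = [] := by
      have := pv_dropWhile_ws ws [] h
      simpa using this
    rw [hws]
    rw [List.isEmpty_iff] at he
    rw [he]
  · exact pv_rstrip_append_ws _ ws h

theorem pv_rstrip_prefix (x : List Char) : PySem.Chars.rstrip x <+: x := by
  unfold PySem.Chars.rstrip
  obtain ⟨s, hs⟩ := List.dropWhile_suffix (l := x.reverse) PySem.Chars.isspace
  exact ⟨s.reverse, by rw [← List.reverse_append, hs, List.reverse_reverse]⟩

theorem pv_lstrip_idem (x : List Char) :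
    PySem.Chars.lstrip (PySem.Chars.lstrip x) = PySem.Chars.lstrip x := by
  unfold PySem.Chars.lstrip
  exact List.dropWhile_idempotent _ _

theorem pv_rstrip_idem (x : List Char) :
    PySem.Chars.rstrip (PySem.Chars.rstrip x) = PySem.Chars.rstrip x := by
  unfold PySem.Chars.rstrip
  rw [List.reverse_reverse, List.dropWhile_idempotent]

theorem pv_lstrip_rstrip_lstrip (x : List Char) :
    PySem.Chars.lstrip (PySem.Chars.rstrip (PySem.Chars.lstrip x)) =
      PySem.Chars.rstrip (PySem.Chars.lstrip x) := by
  set y := PySem.Chars.lstrip x with hy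
  cases hr : PySem.Chars.rstrip y with
  | nil => simp [PySem.Chars.lstrip]
  | cons c z =>
    -- head of rstrip y is head of y, and y = lstrip x has non-space head
    obtain ⟨s, hs⟩ := pv_rstrip_prefix y
    rw [hr] at hs
    have hyc : y = c :: (z ++ s) := by rw [← hs]; simp
    have hc : PySem.Chars.isspace c = false := by
      by_contra hcs
      have hcs' : PySem.Chars.isspace c = true := by
        cases h' : PySem.Chars.isspace c
        · exact absurd h' hcs
        · rfl
      have : PySem.Chars.lstrip y = y := by rw [hy, pv_lstrip_idem]
      rw [hyc] at this
      unfold PySem.Chars.lstrip at this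
      rw [List.dropWhile_cons, if_pos hcs'] at this
      have hlen := List.length_dropWhile_le PySem.Chars.isspace (z ++ s)
      rw [this] at hlen
      simp at hlen
    unfold PySem.Chars.lstrip
    rw [List.dropWhile_cons, if_neg (by simp [hc])]

theorem pv_strip_strip (q : List Char) :
    PySem.Chars.strip (PySem.Chars.strip q) = PySem.Chars.strip q := by
  unfold PySem.Chars.strip
  rw [pv_lstrip_rstrip_lstrip, pv_rstrip_idem]

theorem pv_capB_ws_append (ws f : List Char) (h : ∀ c ∈ ws, PySem.Chars.isspace c = true) :
    pvCapB (ws ++ f) = pvCapB f := by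
  unfold pvCapB
  rw [pv_strip_ws_append ws f h]

theorem pv_capB_append_ws (f ws : List Char) (h : ∀ c ∈ ws, PySem.Chars.isspace c = true) :
    pvCapB (f ++ ws) = pvCapB f := by
  unfold pvCapB
  rw [pv_strip_append_ws f ws h]

theorem pv_isspace_not_delim (c : Char) (h : PySem.Chars.isspace c = true) :
    ¬(c = '-' ∨ c = '\'') := by
  rintro (rfl | rfl) <;> exact absurd h (by decide)

theorem pvStBGo_ws_append (ws t : List Char) (h : ∀ c ∈ ws, PySem.Chars.isspace c = true)
    (out : List (List Char)) (frag : List Char) :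
    pvStBGo out frag (ws ++ t) = pvStBGo out (frag ++ ws) t := by
  induction ws generalizing frag with
  | nil => simp
  | cons c ws' ih =>
    simp only [List.cons_append, pvStBGo]
    rw [if_neg (pv_isspace_not_delim c (h c (List.mem_cons_self ..)))]
    rw [ih (fun c hc => h c (List.mem_cons_of_mem _ hc))]
    simp

theorem pvStBGo_frag_ws (ws : List Char) (h : ∀ c ∈ ws, PySem.Chars.isspace c = true)
    (t : List Char) (out : List (List Char)) (f : List Char) :
    pvStBGo out (ws ++ f) t = pvStBGo out f t := by
  induction t generalizing out f with
  | nil => simp [pvStBGo, pv_capB_ws_append ws f h]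
  | cons c rest ih =>
    simp only [pvStBGo]
    split_ifs with hc
    · rw [pv_capB_ws_append ws f h]
    · rw [List.append_assoc]
      exact ih out (f ++ [c])

theorem pvStBGo_append_ws (u ws : List Char) (h : ∀ c ∈ ws, PySem.Chars.isspace c = true)
    (out : List (List Char)) (frag : List Char) :
    pvStBGo out frag (u ++ ws) = pvStBGo out frag u := by
  induction u generalizing out frag with
  | nil =>
    simp only [List.nil_append]
    rw [show ws = ws ++ [] by simp, pvStBGo_ws_append ws [] h]
    simp [pvStBGo, pv_capB_append_ws frag ws h]
  | cons c u' ih =>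
    simp only [List.cons_append, pvStBGo]
    split_ifs with hc
    · rw [ih]
    · rw [ih]

theorem pvS_nil : pvS [] = [] := by
  simp [pvS, pvStBGo, pvCapB, PySem.Chars.join_singleton, PySem.Chars.strip,
    PySem.Chars.lstrip, PySem.Chars.rstrip, PySem.Chars.slice, PySem.List.slice,
    PySem.Chars.upper, PySem.Chars.lower]

theorem pv_mem_takeWhile (p : Char → Bool) (l : List Char) (c : Char)
    (h : c ∈ l.takeWhile p) : p c = true := by
  induction l with
  | nil => simp at h
  | cons a l' ih =>
    rw [List.takeWhile_cons] at h
    split_ifs at h with ha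
    · rcases List.mem_cons.mp h with rfl | h'
      · exact ha
      · exact ih h'
    · simp at h

theorem pvS_strip (q : List Char) : pvS (PySem.Chars.strip q) = pvS q := by
  have hl : ∀ y : List Char, pvS (PySem.Chars.lstrip y) = pvS y := by
    intro y
    conv_rhs => rw [show y = y.takeWhile PySem.Chars.isspace ++ y.dropWhile PySem.Chars.isspace by
      rw [List.takeWhile_append_dropWhile]]
    unfold pvS
    rw [pvStBGo_ws_append _ _ (fun c hc => pv_mem_takeWhile _ _ c hc)]
    rw [show ([] : List Char) ++ y.takeWhile PySem.Chars.isspace =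
          y.takeWhile PySem.Chars.isspace ++ [] by simp]
    rw [pvStBGo_frag_ws _ (fun c hc => pv_mem_takeWhile _ _ c hc)]
    rfl
  have hr : ∀ y : List Char, pvS (PySem.Chars.rstrip y) = pvS y := by
    intro y
    have hsplit : y = PySem.Chars.rstrip y ++ (y.reverse.takeWhile PySem.Chars.isspace).reverse := by
      unfold PySem.Chars.rstrip
      conv_rhs => rw [← List.reverse_append, List.takeWhile_append_dropWhile,
        List.reverse_reverse]
    conv_rhs => rw [hsplit]
    unfold pvS
    rw [pvStBGo_append_ws _ _ (fun c hc => pv_mem_takeWhile _ _ c (List.mem_reverse.mp hc))]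
  show pvS (PySem.Chars.rstrip (PySem.Chars.lstrip q)) = pvS q
  rw [hr, hl]

theorem pvS_nodelim (t : List Char) (h : ∀ c ∈ t, ¬(c = '-' ∨ c = '\'')) :
    pvS t = pvCapB t := by
  unfold pvS
  rw [pvStBGo_nodelim t h [] []]
  simp [PySem.Chars.join_singleton]

theorem pvS_eq_flatten (t : List Char) : pvS t = (pvStBGo [] [] t).flatten := by
  unfold pvS
  rw [pv_join_nil_eq_flatten]

theorem pvS_join (d : Char) (hd : d = '-' ∨ d = '\'') (parts : List (List Char)) :
    pvS (PySem.Chars.join [d] parts) = PySem.Chars.join [d] (parts.map pvS) := by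
  induction parts with
  | nil => simp [PySem.Chars.join_nil, pvS_nil]
  | cons p rest ih =>
    cases rest with
    | nil => simp [PySem.Chars.join_singleton]
    | cons q rs =>
      rw [PySem.Chars.join_cons_cons]
      rw [show p ++ [d] ++ PySem.Chars.join [d] (q :: rs) =
            p ++ d :: PySem.Chars.join [d] (q :: rs) by simp]
      rw [pvS_eq_flatten, pvStBGo_delim d hd, List.flatten_append, List.flatten_append]
      rw [← pvS_eq_flatten, ← pvS_eq_flatten, ih]
      simp [PySem.Chars.join_cons_cons]

theorem pvSplitChar_join (d : Char) (t : List Char) :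
    PySem.Chars.join [d] (pvSplitChar d t) = t := by
  induction t with
  | nil => simp [pvSplitChar, PySem.Chars.join_singleton]
  | cons c rest ih =>
    simp only [pvSplitChar]
    by_cases hc : c = d
    · rw [if_pos hc]
      cases hsp : pvSplitChar d rest with
      | nil => exact absurd hsp (pvSplitChar_ne_nil d rest)
      | cons p ps =>
        rw [PySem.Chars.join_cons_cons]
        rw [hsp] at ih
        rw [ih]
        simp [hc]
    · rw [if_neg hc]
      cases hsp : pvSplitChar d rest with
      | nil => exact absurd hsp (pvSplitChar_ne_nil d rest)
      | cons p ps =>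
        rw [hsp] at ih
        cases ps with
        | nil =>
          rw [PySem.Chars.join_singleton] at ih ⊢
          rw [← ih]
        | cons q qs =>
          rw [PySem.Chars.join_cons_cons] at ih
          rw [PySem.Chars.join_cons_cons, ← ih]
          simp

theorem pv_main_aux : ∀ (n : Nat) (cs : List Char), cs.length ≤ n →
    pvStA cs = pvS (PySem.Chars.strip cs) := by
  intro n
  induction n with
  | zero =>
    intro cs h
    have : cs = [] := List.length_eq_zero_iff.mp (Nat.le_zero.mp h)
    subst this
    rw [pvStA]
    simp [PySem.Chars.strip, PySem.Chars.lstrip, PySem.Chars.rstrip, pvS_nil]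
  | succ n ih =>
    intro cs hle
    rw [pvStA]
    by_cases ht : PySem.Chars.strip cs = []
    · rw [if_pos ht, ht, pvS_nil]
    · rw [if_neg ht]
      by_cases h1 : PySem.Chars.isIn ['-'] (PySem.Chars.strip cs) = true
      · rw [dif_pos h1]
        conv_rhs => rw [← pvSplitChar_join '-' (PySem.Chars.strip cs)]
        rw [pvS_join '-' (Or.inl rfl)]
        rw [pvSplitOn_eq]
        congr 1
        rw [show (pvSplitChar '-' (PySem.Chars.strip cs)).attach.map (fun p => pvStA p.1) =
              (pvSplitChar '-' (PySem.Chars.strip cs)).map (fun p => pvStA p) by simp]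
        apply List.map_congr_left
        intro p hp
        have hlt : p.length < cs.length :=
          Nat.lt_of_lt_of_le
            (pvSplitChar_length_lt '-' _ ((pv_isIn_singleton '-' _).mp h1) p hp)
            (pv_strip_length_le cs)
        rw [ih p (by omega)]
        exact pvS_strip p
      · rw [dif_neg h1]
        by_cases h2 : PySem.Chars.isIn ['\''] (PySem.Chars.strip cs) = true
        · rw [dif_pos h2]
          conv_rhs => rw [← pvSplitChar_join '\'' (PySem.Chars.strip cs)]
          rw [pvS_join '\'' (Or.inr rfl)]
          rw [pvSplitOn_eq]
          congr 1
          rw [show (pvSplitChar '\'' (PySem.Chars.strip cs)).attach.map (fun p => pvStA p.1) =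
                (pvSplitChar '\'' (PySem.Chars.strip cs)).map (fun p => pvStA p) by simp]
          apply List.map_congr_left
          intro p hp
          have hlt : p.length < cs.length :=
            Nat.lt_of_lt_of_le
              (pvSplitChar_length_lt '\'' _ ((pv_isIn_singleton '\'' _).mp h2) p hp)
              (pv_strip_length_le cs)
          rw [ih p (by omega)]
          exact pvS_strip p
        · rw [dif_neg h2]
          have hnod : ∀ c ∈ PySem.Chars.strip cs, ¬(c = '-' ∨ c = '\'') := by
            intro c hc
            rintro (rfl | rfl)
            · exact h1 ((pv_isIn_singleton _ _).mpr hc)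
            · exact h2 ((pv_isIn_singleton _ _).mpr hc)
          rw [pvS_nodelim _ hnod]
          unfold pvCapB
          rw [pv_strip_strip]

theorem pv_main (cs : List Char) : pvStA cs = pvS (PySem.Chars.strip cs) :=
  pv_main_aux cs.length cs le_rfl

-- ===== VERDICT (by name: the statement is the Claim_ definition above) =====
theorem smart_title_token_spec : Claim_equal_smart_title_token := by
  intro token _
  unfold Spec_smart_title_token smart_title_token smart_title_token_alt
  rw [pv_main]
  by_cases h : PySem.Chars.strip token.toList = []
  · rw [if_pos h, h, pvS_nil]
  · rw [if_neg h]
    rfl
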